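-- pv_equiv track=rewrite | github.com/jarali/CCC_Benchmark | render_graphs.py | group_machines_by_type
-- ===== SOURCE A (Python) =====
-- def group_machines_by_type(grouped_results):
--     """Groups machines by type (AMD/SEV or Intel/TDX)."""
--     group1 = {}  # AMD/SEV
--     group2 = {}  # Intel/TDX
--     group_other = {}  # Neither group
--     for machine_name, machine_results in grouped_results.items():
--         if 'AMD' in machine_name or 'SEV' in machine_name:
--             group1[machine_name] = machine_results
--         elif 'intel' in machine_name.lower() or 'TDX' in machine_name:
--             group2[machine_name] = machine_results
--         else:
--             group_other[machine_name] = machine_results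
--     return group1, group2, group_other
-- ===== SOURCE B (Python) =====
-- def group_machines_by_type(grouped_results):
--     """Groups machines by type (AMD/SEV or Intel/TDX)."""
--     def is_amd(name):
--         return 'AMD' in name or 'SEV' in name
--     def is_intel(name):
--         return 'intel' in name.lower() or 'TDX' in name
--     group1 = {k: v for k, v in grouped_results.items() if is_amd(k)}
--     group2 = {k: v for k, v in grouped_results.items() if not is_amd(k) and is_intel(k)}
--     group_other = {k: v for k, v in grouped_results.items() if not is_amd(k) and not is_intel(k)}
--     return group1, group2, group_other
-- ===== Notes on version B (the rewrite author's own statement) =====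
-- stated objective: idiomatic
-- what changed: Replaced the single loop mutating three dicts with three independent dict comprehensions, each with an explicit predicate encoding the if/elif precedence.
import Mathlib
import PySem

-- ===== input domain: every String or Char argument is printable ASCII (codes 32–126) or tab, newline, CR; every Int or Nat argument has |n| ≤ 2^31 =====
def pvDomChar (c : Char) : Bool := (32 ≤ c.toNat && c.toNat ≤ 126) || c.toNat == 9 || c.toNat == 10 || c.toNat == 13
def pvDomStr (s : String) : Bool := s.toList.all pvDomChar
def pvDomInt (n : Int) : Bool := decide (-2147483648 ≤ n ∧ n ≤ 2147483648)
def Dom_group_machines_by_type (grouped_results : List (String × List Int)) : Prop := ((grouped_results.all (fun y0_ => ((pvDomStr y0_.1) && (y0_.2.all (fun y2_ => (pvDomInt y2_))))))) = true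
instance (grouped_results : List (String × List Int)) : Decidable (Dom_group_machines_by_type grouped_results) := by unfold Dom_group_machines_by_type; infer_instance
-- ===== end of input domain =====

-- B replaces A's single loop mutating three dicts by three independent comprehensions
-- with explicit predicates (objective: more idiomatic).

-- ===== PORT A =====
-- 'AMD' in name or 'SEV' in name
def pvIsAmd (name : String) : Bool := PySem.Str.isIn "AMD" name || PySem.Str.isIn "SEV" name
-- 'intel' in name.lower() or 'TDX' in name
def pvIsIntel (name : String) : Bool := PySem.Str.isIn "intel" (PySem.Str.lower name) || PySem.Str.isIn "TDX" name

def group_machines_by_type (grouped_results : List (String × List Int)) : (List (String × List Int)) × (List (String × List Int)) × (List (String × List Int)) :=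
  grouped_results.foldl
    (fun s kv =>
      if pvIsAmd kv.1 then (s.1 ++ [kv], s.2.1, s.2.2)
      else if pvIsIntel kv.1 then (s.1, s.2.1 ++ [kv], s.2.2)
      else (s.1, s.2.1, s.2.2 ++ [kv]))
    ([], [], [])

-- ===== PORT B =====
def group_machines_by_type_alt (grouped_results : List (String × List Int)) : (List (String × List Int)) × (List (String × List Int)) × (List (String × List Int)) :=
  (grouped_results.filter (fun kv => pvIsAmd kv.1),
   grouped_results.filter (fun kv => !pvIsAmd kv.1 && pvIsIntel kv.1),
   grouped_results.filter (fun kv => !pvIsAmd kv.1 && !pvIsIntel kv.1))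

-- ===== PRECONDITION & SPEC =====
def Spec_group_machines_by_type (grouped_results : List (String × List Int)) (out : (List (String × List Int)) × (List (String × List Int)) × (List (String × List Int))) : Prop := out = group_machines_by_type_alt grouped_results
instance (grouped_results : List (String × List Int)) (out : (List (String × List Int)) × (List (String × List Int)) × (List (String × List Int))) : Decidable (Spec_group_machines_by_type grouped_results out) := by unfold Spec_group_machines_by_type; infer_instance

-- ===== CLAIM (what is proved, stated in full; the proofs are below) =====
def Claim_equal_group_machines_by_type : Prop := ∀ (grouped_results : List (String × List Int)), Dom_group_machines_by_type grouped_results → Spec_group_machines_by_type grouped_results (group_machines_by_type grouped_results)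

-- ===== LEMMAS AND PROOFS =====
theorem group_fold_eq (l : List (String × List Int)) :
    ∀ (a b c : List (String × List Int)),
      l.foldl
        (fun s kv =>
          if pvIsAmd kv.1 then (s.1 ++ [kv], s.2.1, s.2.2)
          else if pvIsIntel kv.1 then (s.1, s.2.1 ++ [kv], s.2.2)
          else (s.1, s.2.1, s.2.2 ++ [kv]))
        (a, b, c)
      = (a ++ l.filter (fun kv => pvIsAmd kv.1),
         b ++ l.filter (fun kv => !pvIsAmd kv.1 && pvIsIntel kv.1),
         c ++ l.filter (fun kv => !pvIsAmd kv.1 && !pvIsIntel kv.1)) := by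
  induction l with
  | nil => intro a b c; simp
  | cons hd tl ih =>
      intro a b c
      by_cases h1 : pvIsAmd hd.1
      · simp [List.foldl_cons, List.filter_cons, h1, ih]
      · by_cases h2 : pvIsIntel hd.1
        · simp [List.foldl_cons, h1, h2, ih]
        · simp [List.foldl_cons, List.filter_cons, h1, h2, ih]

-- ===== VERDICT (by name: the statement is the Claim_ definition above) =====
theorem group_machines_by_type_spec : Claim_equal_group_machines_by_type := by
  intro l _
  unfold Spec_group_machines_by_type group_machines_by_type group_machines_by_type_alt
  simpa using group_fold_eq l [] [] []
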